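-- pv_equiv track=rewrite | github.com/Bereket234/competitive-programming | african_cross_word/african_cross_word.py | african_word
-- ===== SOURCE A (Python) =====
-- def african_word(n, m, grid):
--     row= [{} for _ in range(n)]
--     col= [{} for _ in range(m)]
--     res= []
--     for i in range(n):
--         for j in range(m):
--             val= grid[i][j]
--             row[i][val]=1 + row[i].get(val, 0)
--             col[j][val]= 1+ col[j].get(val, 0)
--     for i in range(n):
--         for j in range(m):
--             val= grid[i][j]
--             cntr= row[i].get(val, 0)
--             cntc= col[j].get(val, 0)
--             if cntr == 1 and cntc ==1:
--                 res.append(val)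
--     return res
-- ===== SOURCE B (Python) =====
-- def african_word(n, m, grid):
--     res = []
--     for i in range(n):
--         for j in range(m):
--             v = grid[i][j]
--             if grid[i][:m].count(v) == 1 and [grid[r][j] for r in range(n)].count(v) == 1:
--                 res.append(v)
--     return res
-- ===== Notes on version B (the rewrite author's own statement) =====
-- stated objective: simpler
-- what changed: B drops A's two precomputed lists of per-row/per-column count dictionaries and instead, inside the single nested loop, counts the value directly by scanning its row slice grid[i][:m] and the column comprehension [grid[r][j] for r in range(n)].
import Mathlib
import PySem

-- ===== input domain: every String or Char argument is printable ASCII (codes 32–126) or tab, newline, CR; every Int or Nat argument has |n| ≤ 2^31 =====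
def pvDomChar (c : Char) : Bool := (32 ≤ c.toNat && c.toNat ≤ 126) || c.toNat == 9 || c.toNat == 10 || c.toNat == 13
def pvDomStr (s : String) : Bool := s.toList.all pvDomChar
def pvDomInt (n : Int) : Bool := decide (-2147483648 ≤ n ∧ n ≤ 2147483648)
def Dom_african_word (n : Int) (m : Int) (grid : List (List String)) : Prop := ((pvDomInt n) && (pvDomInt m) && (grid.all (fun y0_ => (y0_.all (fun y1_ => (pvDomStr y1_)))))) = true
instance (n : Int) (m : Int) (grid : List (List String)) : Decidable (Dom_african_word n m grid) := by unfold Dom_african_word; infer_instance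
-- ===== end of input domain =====

-- B replaces A's precomputed row/column count dictionaries by direct on-the-fly
-- counting scans (row slice .count and a column comprehension .count); objective: simpler.

-- ===== PORT A =====
def african_word (n : Int) (m : Int) (grid : List (List String)) : List String :=
  let row0 : List (PySem.Dict String Int) := (PySem.List.pyRange 0 n 1).map (fun _ => PySem.Dict.empty)
  let col0 : List (PySem.Dict String Int) := (PySem.List.pyRange 0 m 1).map (fun _ => PySem.Dict.empty)
  let st := (PySem.List.pyRange 0 n 1).foldl (fun st i =>
      (PySem.List.pyRange 0 m 1).foldl (fun st j =>
        let val := PySem.List.pyGetD (PySem.List.pyGetD grid i []) j ""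
        (st.1.modify i.toNat (fun d => d.insert val (1 + d.getD val 0)),
         st.2.modify j.toNat (fun d => d.insert val (1 + d.getD val 0)))) st) (row0, col0)
  (PySem.List.pyRange 0 n 1).foldl (fun res i =>
    (PySem.List.pyRange 0 m 1).foldl (fun res j =>
      let val := PySem.List.pyGetD (PySem.List.pyGetD grid i []) j ""
      let cntr := (PySem.List.pyGetD st.1 i PySem.Dict.empty).getD val 0
      let cntc := (PySem.List.pyGetD st.2 j PySem.Dict.empty).getD val 0
      if cntr == 1 && cntc == 1 then res ++ [val] else res) res) []

-- ===== PORT B =====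
def african_word_alt (n : Int) (m : Int) (grid : List (List String)) : List String :=
  (PySem.List.pyRange 0 n 1).foldl (fun res i =>
    (PySem.List.pyRange 0 m 1).foldl (fun res j =>
      let v := PySem.List.pyGetD (PySem.List.pyGetD grid i []) j ""
      if (PySem.List.slice (PySem.List.pyGetD grid i []) none (some m)).count v == 1
         && ((PySem.List.pyRange 0 n 1).map
              (fun r => PySem.List.pyGetD (PySem.List.pyGetD grid r []) j "")).count v == 1
      then res ++ [v] else res) res) []

-- ===== PRECONDITION & SPEC =====
-- Pre_ excludes exactly the inputs on which A raises IndexError: when both loops run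
-- (0 < n and 0 < m), the grid must have at least n rows and each of its first n rows
-- at least m entries.
def Pre_african_word (n : Int) (m : Int) (grid : List (List String)) : Prop :=
  0 < n → 0 < m → n ≤ (grid.length : Int) ∧ ∀ row ∈ grid.take n.toNat, m ≤ (row.length : Int)
instance (n : Int) (m : Int) (grid : List (List String)) : Decidable (Pre_african_word n m grid) := by unfold Pre_african_word; infer_instance

def pvWitness_african_word : Int × Int × List (List String) := (2, 2, [["a", "b"], ["b", "b"]])

def Spec_african_word (n : Int) (m : Int) (grid : List (List String)) (out : List String) : Prop := out = african_word_alt n m grid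
instance (n : Int) (m : Int) (grid : List (List String)) (out : List String) : Decidable (Spec_african_word n m grid out) := by unfold Spec_african_word; infer_instance

-- ===== CLAIM (what is proved, stated in full; the proofs are below) =====
def Claim_equal_african_word : Prop := ∀ (n : Int) (m : Int) (grid : List (List String)), Dom_african_word n m grid → Pre_african_word n m grid → Spec_african_word n m grid (african_word n m grid)

-- ===== LEMMAS AND PROOFS =====

-- A fold of modifies at indices all different from k leaves position k unchanged.
theorem pv_foldl_modify_untouched {α : Type} (l : List Int) (g : Int → α → α)
    (xs : List α) (k : Nat) (h : ∀ j ∈ l, j.toNat ≠ k) :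
    (l.foldl (fun xs j => xs.modify j.toNat (g j)) xs)[k]? = xs[k]? := by
  induction l generalizing xs with
  | nil => rfl
  | cons a t ih =>
    simp only [List.foldl_cons]
    rw [ih _ (fun j hj => h j (List.mem_cons_of_mem _ hj))]
    rw [List.getElem?_modify]
    simp [h a (List.mem_cons_self)]

-- A fold of modifies over range(0,m) at the loop index: position k < m receives g k once.
theorem pv_foldl_modify_range {α : Type} (m : Int) (g : Int → α → α)
    (xs : List α) (k : Nat) (hk : (k : Int) < m) :
    ((PySem.List.pyRange 0 m 1).foldl (fun xs j => xs.modify j.toNat (g j)) xs)[k]?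
      = (xs[k]?).map (g (k : Int)) := by
  rw [PySem.List.pyRange_one_append 0 (k : Int) m (by omega) (by omega)]
  rw [PySem.List.pyRange_one_cons hk]
  rw [List.foldl_append, List.foldl_cons]
  rw [pv_foldl_modify_untouched _ g _ k
    (by intro j hj; rw [PySem.List.mem_pyRange_one] at hj; omega)]
  rw [List.getElem?_modify]
  have : ((k : Int)).toNat = k := by omega
  rw [this]
  rw [pv_foldl_modify_untouched _ g _ k
    (by intro j hj; rw [PySem.List.mem_pyRange_one] at hj; omega)]
  simp

-- Repeated modify at one fixed index is a single modify with the composed function.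
theorem pv_foldl_modify_same {α : Type} (l : List Int) (k : Nat) (g : Int → α → α)
    (xs : List α) :
    l.foldl (fun xs j => xs.modify k (g j)) xs
      = xs.modify k (fun d => l.foldl (fun d j => g j d) d) := by
  induction l generalizing xs with
  | nil =>
    apply List.ext_getElem?
    intro i
    by_cases hi : i = k
    · subst hi; simp
    · simp [Ne.symm hi]
  | cons a t ih =>
    simp only [List.foldl_cons]
    rw [ih]
    apply List.ext_getElem?
    intro i
    by_cases hi : i = k
    · subst hi; simp only [List.getElem?_modify]; cases xs[i]? <;> rfl
    · simp [Ne.symm hi]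

-- The counting fold of A's dict update, keyed through f, reads back as a list count.
theorem pv_getD_count_fold (l : List Int) (f : Int → String)
    (v : String) :
    ((l.foldl (fun (d : PySem.Dict String Int) j => d.insert (f j) (1 + d.getD (f j) 0)) PySem.Dict.empty).getD v 0)
      = ((l.map f).count v : Int) := by
  have h1 : l.foldl (fun (d : PySem.Dict String Int) j => d.insert (f j) (1 + d.getD (f j) 0)) PySem.Dict.empty
      = (l.map f).foldl (fun (d : PySem.Dict String Int) x => d.insert x (d.getD x 0 + 1)) PySem.Dict.empty := by
    rw [List.foldl_map]
    apply PySem.List.foldl_congr_mem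
    intro acc x _
    rw [Int.add_comm]
  rw [h1, PySem.Dict.getD_foldl_insert_add_one]
  simp [PySem.Dict.getD_empty]

-- A comprehension [xs[j] for j in range(m)] is take m when the list is long enough.
theorem pv_map_pyGetD_range_take {α : Type} (xs : List α) (d : α) (m : Int)
    (h : m.toNat ≤ xs.length) :
    (PySem.List.pyRange 0 m 1).map (fun j => PySem.List.pyGetD xs j d) = xs.take m.toNat := by
  apply List.ext_getElem
  · simp [PySem.List.length_pyRange_one]; omega
  · intro i h1 h2
    simp only [List.getElem_map, PySem.List.getElem_pyRange_one, List.getElem_take]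
    have hi : i < m.toNat := by simpa [PySem.List.length_pyRange_one] using h1
    rw [show (0 : Int) + (i : Int) = ((i : Nat) : Int) by omega]
    rw [PySem.List.pyGetD_natCast, List.getD_eq_getElem?_getD, List.getElem?_eq_getElem (by omega)]
    rfl

-- Column dicts: position k < m of the pair-fold's column component, over any outer list.
theorem pv_col_fold (m : Int) (val : Int → Int → String) (l : List Int)
    (col : List (PySem.Dict String Int)) (k : Nat) (hk : (k : Int) < m) :
    ((l.foldl (fun col i =>
        (PySem.List.pyRange 0 m 1).foldl
          (fun col j => col.modify j.toNat (fun d => d.insert (val i j) (1 + d.getD (val i j) 0))) col) col)[k]?)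
      = (col[k]?).map (fun d =>
          l.foldl (fun d i => d.insert (val i (k : Int)) (1 + d.getD (val i (k : Int)) 0)) d) := by
  induction l generalizing col with
  | nil => simp
  | cons a t ih =>
    simp only [List.foldl_cons]
    rw [ih]
    rw [pv_foldl_modify_range m (fun j d => d.insert (val a j) (1 + d.getD (val a j) 0)) col k hk]
    rw [Option.map_map]
    rfl

-- The pair-state build loop is two independent loops (rows, columns).
theorem pv_st_split (F G : Int → Int → PySem.Dict String Int → PySem.Dict String Int)
    (mr : List Int) (l : List Int) (a b : List (PySem.Dict String Int)) :
    l.foldl (fun st i => mr.foldl (fun st j =>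
        (st.1.modify i.toNat (F i j), st.2.modify j.toNat (G i j))) st) (a, b)
      = (l.foldl (fun row i => mr.foldl (fun row j => row.modify i.toNat (F i j)) row) a,
         l.foldl (fun col i => mr.foldl (fun col j => col.modify j.toNat (G i j)) col) b) := by
  induction l generalizing a b with
  | nil => rfl
  | cons x t ih =>
    simp only [List.foldl_cons]
    rw [PySem.List.foldl_prod_mk (f := fun (row : List (PySem.Dict String Int)) j => row.modify x.toNat (F x j))
        (g := fun (col : List (PySem.Dict String Int)) j => col.modify j.toNat (G x j))]
    exact ih _ _

theorem pv_beq_cast (c : Nat) : (((c : Int)) == (1 : Int)) = (c == 1) := by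
  by_cases h : c = 1 <;> simp [h]

-- An inner per-row update loop is a single modify at the fixed row index.
theorem pv_rowfold (n m : Int) (val : Int → Int → String)
    (row : List (PySem.Dict String Int)) :
    (PySem.List.pyRange 0 n 1).foldl (fun row i =>
        (PySem.List.pyRange 0 m 1).foldl (fun row j =>
          row.modify i.toNat (fun d => d.insert (val i j) (1 + d.getD (val i j) 0))) row) row
      = (PySem.List.pyRange 0 n 1).foldl (fun row i =>
          row.modify i.toNat (fun d =>
            (PySem.List.pyRange 0 m 1).foldl
              (fun d j => d.insert (val i j) (1 + d.getD (val i j) 0)) d)) row := by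
  apply PySem.List.foldl_congr_mem
  intro acc x _
  exact pv_foldl_modify_same _ _ _ _

-- A's row dict lookup is the count in the first m entries of row i.
theorem pv_cntr (grid : List (List String)) (n m i j : Int) (hm : 0 ≤ m)
    (hi0 : 0 ≤ i) (hin : i < n)
    (hmlen : m.toNat ≤ (PySem.List.pyGetD grid i []).length) :
    ((PySem.List.pyGetD
        ((PySem.List.pyRange 0 n 1).foldl (fun row i =>
          (PySem.List.pyRange 0 m 1).foldl (fun row j =>
            row.modify i.toNat (fun d =>
              d.insert (PySem.List.pyGetD (PySem.List.pyGetD grid i []) j "")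
                (1 + d.getD (PySem.List.pyGetD (PySem.List.pyGetD grid i []) j "") 0))) row)
          ((PySem.List.pyRange 0 n 1).map (fun _ => (PySem.Dict.empty : PySem.Dict String Int))))
        i PySem.Dict.empty).getD (PySem.List.pyGetD (PySem.List.pyGetD grid i []) j "") 0)
      = (((PySem.List.slice (PySem.List.pyGetD grid i []) none (some m)).count
          (PySem.List.pyGetD (PySem.List.pyGetD grid i []) j "") : Int)) := by
  rw [pv_rowfold n m (fun i j => PySem.List.pyGetD (PySem.List.pyGetD grid i []) j "")]
  have hn : 0 < n := by omega
  have hiN : i = ((i.toNat : Int)) := by omega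
  rw [hiN] at hmlen ⊢
  rw [PySem.List.pyGetD_natCast, List.getD_eq_getElem?_getD]
  rw [pv_foldl_modify_range n _ _ i.toNat (by omega)]
  have hrow0 : ((PySem.List.pyRange 0 n 1).map
      (fun _ => (PySem.Dict.empty : PySem.Dict String Int)))[i.toNat]?
      = some PySem.Dict.empty := by
    rw [List.getElem?_map, List.getElem?_eq_getElem
      (by rw [PySem.List.length_pyRange_one]; omega)]
    rfl
  rw [hrow0]
  simp only [Option.map_some, Option.getD_some]
  rw [pv_getD_count_fold (PySem.List.pyRange 0 m 1)
      (fun j => PySem.List.pyGetD (PySem.List.pyGetD grid ((i.toNat : Int)) []) j "")]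
  rw [pv_map_pyGetD_range_take _ _ _ hmlen]
  rw [PySem.List.slice_to _ hm]

-- A's column dict lookup is the count down column j.
theorem pv_cntc (n m j : Int) (val : Int → Int → String) (v : String)
    (hj0 : 0 ≤ j) (hjm : j < m) :
    ((PySem.List.pyGetD
        ((PySem.List.pyRange 0 n 1).foldl (fun col i =>
          (PySem.List.pyRange 0 m 1).foldl (fun col j =>
            col.modify j.toNat (fun d =>
              d.insert (val i j) (1 + d.getD (val i j) 0))) col)
          ((PySem.List.pyRange 0 m 1).map (fun _ => (PySem.Dict.empty : PySem.Dict String Int))))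
        j PySem.Dict.empty).getD v 0)
      = (((PySem.List.pyRange 0 n 1).map (fun r => val r j)).count v : Int) := by
  have hjN : j = ((j.toNat : Int)) := by omega
  rw [hjN]
  rw [PySem.List.pyGetD_natCast, List.getD_eq_getElem?_getD]
  rw [pv_col_fold m val _ _ j.toNat (by omega)]
  have hcol0 : ((PySem.List.pyRange 0 m 1).map
      (fun _ => (PySem.Dict.empty : PySem.Dict String Int)))[j.toNat]?
      = some PySem.Dict.empty := by
    rw [List.getElem?_map, List.getElem?_eq_getElem
      (by rw [PySem.List.length_pyRange_one]; omega)]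
    rfl
  rw [hcol0]
  simp only [Option.map_some, Option.getD_some]
  rw [pv_getD_count_fold (PySem.List.pyRange 0 n 1) (fun r => val r ((j.toNat : Int)))]

-- ===== VERDICT (by name: the statement is the Claim_ definition above) =====
theorem african_word_spec : Claim_equal_african_word := by
  intro n m grid _ hpre
  unfold Spec_african_word african_word african_word_alt
  by_cases hn : 0 < n
  case neg =>
    rw [PySem.List.pyRange_one_eq_nil (by omega)]
    rfl
  by_cases hm : 0 < m
  case neg =>
    rw [PySem.List.pyRange_one_eq_nil (a := (0:Int)) (b := m) (by omega)]
    simp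
  obtain ⟨hlen, hrows⟩ := hpre hn hm
  dsimp only
  rw [pv_st_split (F := fun i j d => d.insert (PySem.List.pyGetD (PySem.List.pyGetD grid i []) j "") (1 + d.getD (PySem.List.pyGetD (PySem.List.pyGetD grid i []) j "") 0))
      (G := fun i j d => d.insert (PySem.List.pyGetD (PySem.List.pyGetD grid i []) j "") (1 + d.getD (PySem.List.pyGetD (PySem.List.pyGetD grid i []) j "") 0))]
  dsimp only
  apply PySem.List.foldl_congr_mem
  intro res i hi
  apply PySem.List.foldl_congr_mem
  intro res2 j hj
  rw [PySem.List.mem_pyRange_one] at hi hj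
  have hmlen : m.toNat ≤ (PySem.List.pyGetD grid i []).length := by
    have hgi : PySem.List.pyGetD grid i [] = grid[i.toNat]'(by omega) :=
      PySem.List.pyGetD_eq_getElem _ _ (by omega) (by omega)
    have hlt : i.toNat < (grid.take n.toNat).length := by
      simp only [List.length_take]
      omega
    have hmem : (grid.take n.toNat)[i.toNat]'hlt ∈ grid.take n.toNat := List.getElem_mem hlt
    rw [List.getElem_take] at hmem
    have := hrows _ hmem
    rw [hgi]
    omega
  rw [pv_cntr grid n m i j (by omega) hi.1 hi.2 hmlen]
  rw [pv_cntc n m j (fun r j => PySem.List.pyGetD (PySem.List.pyGetD grid r []) j "")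
      (PySem.List.pyGetD (PySem.List.pyGetD grid i []) j "") hj.1 hj.2]
  rw [pv_beq_cast, pv_beq_cast]
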